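-- pv_equiv track=rewrite | github.com/ytyi/Introduction-to-algorithm | knapsack.py | knapsack_small
-- ===== SOURCE A (Python) =====
-- def knapsack_small(total,L):
--     L.sort()
--     if total==0:
--         return 1,[]
--     if len(L)==1 and L[0]!=total:
--         return 0,[]
--     elif len(L)==1 and L[0]==total:
--         return 1,L
--     else:
--         num=L[0]
--         Lti=[]
--         Lres=[]
--         for i in range(0,len(L)):
--             Lti.append(L[i])
--         Lti.pop(0)
--         if num>total:
--             return 0,[]
--         else:
--             index,Lres=knapsack_small(total-num,Lti)
--             if index==0:
--                 return 0,[]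
--             else:
--                 Lres.insert(0,num)
--                 return 1,Lres
-- ===== SOURCE B (Python) =====
-- def knapsack_small(total, L):
--     # Sort once and scan the prefix sums iteratively, instead of re-sorting
--     # and copying the whole list at every recursion level.
--     L.sort()
--     rem = total
--     n = len(L)
--     k = 0
--     while k < n - 1:
--         if rem == 0:
--             return 1, L[:k]
--         x = L[k]
--         if x > rem:
--             return 0, []
--         rem -= x
--         k += 1
--     if rem == 0:
--         return 1, L[:k]
--     return (1, L) if L[k] == rem else (0, [])
-- ===== Notes on version B (the rewrite author's own statement) =====
-- stated objective: faster
-- what changed: A recursively re-sorts and copies the whole list at every level (O(n^2 log n)); B sorts once and does a single iterative prefix-sum scan with an index and a running remainder (O(n log n)).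
import Mathlib
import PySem

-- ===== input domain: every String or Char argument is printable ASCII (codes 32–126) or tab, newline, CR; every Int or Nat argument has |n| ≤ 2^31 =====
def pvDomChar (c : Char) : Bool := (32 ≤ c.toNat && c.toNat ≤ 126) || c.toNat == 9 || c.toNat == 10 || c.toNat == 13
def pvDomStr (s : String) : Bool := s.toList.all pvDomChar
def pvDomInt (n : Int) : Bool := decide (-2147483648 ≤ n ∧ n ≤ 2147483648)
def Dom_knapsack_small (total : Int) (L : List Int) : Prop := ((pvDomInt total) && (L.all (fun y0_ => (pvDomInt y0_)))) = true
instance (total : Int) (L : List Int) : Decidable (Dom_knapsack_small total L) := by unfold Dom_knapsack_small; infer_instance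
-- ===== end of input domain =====

-- B sorts once and scans prefix sums iteratively instead of A's re-sort-and-copy at every
-- recursion level (objective: faster). Both A and B sort L in place; the claim is about the
-- return value (both perform the same mutation, so callers observe the same list).

-- ===== PORT A =====
-- helper fact cited by the port's decreasing_by: the copy loop rebuilds the list
theorem pvCopyFoldl (xs acc : List Int) :
    (PySem.List.pyRange 0 (xs.length : Int) 1).foldl
      (fun a i => a ++ [PySem.List.pyGetD xs i 0]) acc = acc ++ xs := by
  rw [PySem.List.foldl_pyRange_zero_pyGetD' xs 0 (fun a x => a ++ [x]) acc]
  induction xs generalizing acc with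
  | nil => simp
  | cons x t ih => simp [List.foldl, ih]

def knapsack_small (total : Int) (L : List Int) : Int × List Int :=
  let Ls := PySem.List.sorted L (fun x => x) false       -- L.sort()
  if total == 0 then (1, [])
  else if Ls.length == 1 && (PySem.List.pyGetD Ls 0 0 != total) then (0, [])
  else if Ls.length == 1 && (PySem.List.pyGetD Ls 0 0 == total) then (1, Ls)
  else
    match h : PySem.List.pyGet? Ls 0 with
    | none => (0, [])        -- num = L[0] raises IndexError (only when L = []); excluded by Pre_
    | some num =>
      -- Lti = [];  for i in range(0, len(L)): Lti.append(L[i])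
      let Lti := (PySem.List.pyRange 0 (Ls.length : Int) 1).foldl
                   (fun acc i => acc ++ [PySem.List.pyGetD Ls i 0]) []
      -- Lti.pop(0)
      let Lti2 := ((PySem.List.pop? Lti 0).map Prod.snd).getD []
      if num > total then (0, [])
      else
        let r := knapsack_small (total - num) Lti2
        if r.1 == 0 then (0, [])
        else (1, PySem.List.insert r.2 0 num)
termination_by L.length
decreasing_by
  have hL : Ls = PySem.List.sorted L (fun x => x) false := rfl
  have hcopy : Lti = Ls := by
    show (PySem.List.pyRange 0 (Ls.length : Int) 1).foldl
      (fun a i => a ++ [PySem.List.pyGetD Ls i 0]) [] = Ls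
    simpa using pvCopyFoldl Ls []
  have hne : Ls ≠ [] := by
    intro hnil
    rw [hnil] at h
    simp [PySem.List.pyGet?] at h
  obtain ⟨y, t, hyt⟩ := List.exists_cons_of_ne_nil hne
  have hlen : Ls.length = L.length := PySem.List.length_sorted ..
  have h2 : Lti2 = t := by
    simp [Lti2, hcopy, hyt, PySem.List.pop?_zero_cons]
  have ht : t.length + 1 = L.length := by rw [← hlen, hyt]; simp
  show Lti2.length < L.length
  rw [h2]; omega

-- ===== PORT B =====
-- the while loop of Source B: state (rem, k), scanning Ls; n = len(Ls)
def pvAltLoop (Ls : List Int) (n rem k : Int) : Int × List Int :=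
  if k < n - 1 then
    if rem == 0 then (1, PySem.List.slice Ls none (some k))       -- return 1, L[:k]
    else if PySem.List.pyGetD Ls k 0 > rem then (0, [])          -- x = L[k] (in range whenever the loop runs)
    else pvAltLoop Ls n (rem - PySem.List.pyGetD Ls k 0) (k + 1)
  else
    if rem == 0 then (1, PySem.List.slice Ls none (some k))
    else if PySem.List.pyGetD Ls k 0 == rem then (1, Ls)          -- L[k]: raises only when L = [], excluded by Pre_
    else (0, [])
termination_by (n - k).toNat
decreasing_by omega

def knapsack_small_alt (total : Int) (L : List Int) : Int × List Int :=
  let Ls := PySem.List.sorted L (fun x => x) false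
  pvAltLoop Ls (Ls.length : Int) total 0

-- ===== PRECONDITION & SPEC =====
-- Pre_ excludes exactly the inputs where A raises IndexError: the empty list with total ≠ 0.
def Pre_knapsack_small (total : Int) (L : List Int) : Prop := total = 0 ∨ L ≠ []
instance (total : Int) (L : List Int) : Decidable (Pre_knapsack_small total L) := by
  unfold Pre_knapsack_small; infer_instance
def pvWitness_knapsack_small : Int × List Int := (5, [3, 2])

def Spec_knapsack_small (total : Int) (L : List Int) (out : Int × List Int) : Prop := out = knapsack_small_alt total L
instance (total : Int) (L : List Int) (out : Int × List Int) : Decidable (Spec_knapsack_small total L out) := by unfold Spec_knapsack_small; infer_instance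

-- ===== CLAIM (what is proved, stated in full; the proofs are below) =====
def Claim_equal_knapsack_small : Prop := ∀ (total : Int) (L : List Int), Dom_knapsack_small total L → Pre_knapsack_small total L → Spec_knapsack_small total L (knapsack_small total L)

-- ===== LEMMAS AND PROOFS =====


theorem pv_resort (total : Int) (L : List Int) :
    knapsack_small total L = knapsack_small total (PySem.List.sorted L (fun x => x) false) := by
  conv_lhs => rw [knapsack_small.eq_def]
  conv_rhs => rw [knapsack_small.eq_def]
  rw [PySem.List.sorted_sorted]

theorem pvGetD_append (pre : List Int) (y : Int) (t : List Int) :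
    PySem.List.pyGetD (pre ++ y :: t) ((pre.length : Int)) 0 = y := by
  rw [PySem.List.pyGetD_natCast, List.getD_eq_getElem?_getD,
      List.getElem?_append_right (Nat.le_refl _)]
  simp

theorem pvLti_eq (xs : List Int) :
    ((PySem.List.pop? ((PySem.List.pyRange 0 (xs.length : Int) 1).foldl
        (fun acc i => acc ++ [PySem.List.pyGetD xs i 0]) []) 0).map Prod.snd).getD []
      = xs.tail := by
  have h := pvCopyFoldl xs []
  rw [List.nil_append] at h
  rw [h]
  cases xs with
  | nil => simp [PySem.List.pop?]
  | cons y t => simp [PySem.List.pop?_zero_cons]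


theorem pv_shape (rem : Int) (xs : List Int) :
    (knapsack_small rem xs).1 = 1 ∨ knapsack_small rem xs = (0, []) := by
  fun_induction knapsack_small rem xs
  all_goals simp

theorem pv_main (rem : Int) (xs : List Int) :
    ∀ pre : List Int, (pre ++ xs).Pairwise (· ≤ ·) → xs ≠ [] →
      pvAltLoop (pre ++ xs) (((pre ++ xs).length : Int)) rem ((pre.length : Int)) =
        (if (knapsack_small rem xs).1 == 1 then (1, pre ++ (knapsack_small rem xs).2)
         else (0, [])) := by
  fun_induction knapsack_small rem xs
  · -- total == 0
    rename_i total xs h0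
    intro pre hp hne
    have h0' : total = 0 := by simpa using h0
    subst h0'
    rw [pvAltLoop]
    simp [PySem.List.slice_to_natCast]
  · -- len == 1, L[0] != total
    rename_i total xs Ls h0 h3
    intro pre hp hne
    have hx : xs.Pairwise (fun a b : Int => a ≤ b) := (List.pairwise_append.mp hp).2.1
    have hEq : Ls = xs := by
      have h' : Ls = PySem.List.sorted xs (fun x => x) false := rfl
      rw [h']; exact PySem.List.sorted_eq_self_of_pairwise xs (fun x => x) hx
    rw [hEq] at h3
    simp only [Bool.and_eq_true, beq_iff_eq, bne_iff_ne] at h3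
    obtain ⟨y, rfl⟩ := List.length_eq_one_iff.mp h3.1
    have hy : y ≠ total := by simpa [PySem.List.pyGetD_zero_cons] using h3.2
    rw [pvAltLoop]
    rw [if_neg (by simp only [List.length_append, List.length_cons, List.length_nil]; push_cast; omega)]
    rw [if_neg h0]
    rw [pvGetD_append]
    rw [if_neg (by simpa using hy)]
    simp
  · -- len == 1, L[0] == total
    rename_i total xs Ls h0 hA h3
    intro pre hp hne
    have hx : xs.Pairwise (fun a b : Int => a ≤ b) := (List.pairwise_append.mp hp).2.1
    have hEq : Ls = xs := by
      have h' : Ls = PySem.List.sorted xs (fun x => x) false := rfl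
      rw [h']; exact PySem.List.sorted_eq_self_of_pairwise xs (fun x => x) hx
    rw [hEq] at h3 ⊢
    simp only [Bool.and_eq_true, beq_iff_eq] at h3
    obtain ⟨y, rfl⟩ := List.length_eq_one_iff.mp h3.1
    have hy : y = total := by simpa [PySem.List.pyGetD_zero_cons] using h3.2
    rw [pvAltLoop]
    rw [if_neg (by simp only [List.length_append, List.length_cons, List.length_nil]; push_cast; omega)]
    rw [if_neg h0]
    rw [pvGetD_append]
    rw [if_pos (by simpa using hy)]
    simp
  · -- L[0] raises (L = [])
    rename_i total xs Ls h0 hA hB h4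
    intro pre hp hne
    have hx : xs.Pairwise (fun a b : Int => a ≤ b) := (List.pairwise_append.mp hp).2.1
    have hEq : Ls = xs := by
      have h' : Ls = PySem.List.sorted xs (fun x => x) false := rfl
      rw [h']; exact PySem.List.sorted_eq_self_of_pairwise xs (fun x => x) hx
    rw [hEq] at h4
    cases xs with
    | nil => exact absurd rfl hne
    | cons y t => rw [PySem.List.pyGet?_zero_cons] at h4; exact absurd h4 (by simp)
  · -- num > total
    rename_i total xs Ls h0 hA hB num hsome hgt
    intro pre hp hne
    have hx : xs.Pairwise (fun a b : Int => a ≤ b) := (List.pairwise_append.mp hp).2.1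
    have hEq : Ls = xs := by
      have h' : Ls = PySem.List.sorted xs (fun x => x) false := rfl
      rw [h']; exact PySem.List.sorted_eq_self_of_pairwise xs (fun x => x) hx
    rw [hEq] at hsome hA hB
    cases xs with
    | nil => exact absurd rfl hne
    | cons y t =>
      rw [PySem.List.pyGet?_zero_cons] at hsome
      obtain rfl : y = num := by simpa using hsome
      cases t with
      | nil =>
        simp [PySem.List.pyGetD_zero_cons] at hA hB
        exact absurd hA hB
      | cons z t' =>
        rw [pvAltLoop]
        rw [if_pos (by simp only [List.length_append, List.length_cons]; push_cast; omega)]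
        rw [if_neg h0]
        rw [pvGetD_append]
        rw [if_pos hgt]
        simp
  · -- recursive call, result 0
    rename_i total xs Ls h0 hA hB num hsome Lti Lti2 hle r hr ih
    intro pre hp hne
    have hx : xs.Pairwise (fun a b : Int => a ≤ b) := (List.pairwise_append.mp hp).2.1
    have hsort : PySem.List.sorted xs (fun x => x) false = xs :=
      PySem.List.sorted_eq_self_of_pairwise xs (fun x => x) hx
    have hEq : Ls = xs := by
      have h' : Ls = PySem.List.sorted xs (fun x => x) false := rfl
      rw [h']; exact hsort
    rw [hEq] at hsome hA hB
    cases xs with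
    | nil => exact absurd rfl hne
    | cons y t =>
      rw [PySem.List.pyGet?_zero_cons] at hsome
      obtain rfl : y = num := by simpa using hsome
      cases t with
      | nil =>
        simp [PySem.List.pyGetD_zero_cons] at hA hB
        exact absurd hA hB
      | cons z t' =>
        have hl2 : Lti2 = z :: t' := by
          have h' := pvLti_eq (PySem.List.sorted (y :: z :: t') (fun x => x) false)
          exact h'.trans (by rw [hsort]; rfl)
        have hfst : (knapsack_small (total - y) (z :: t')).1 = 0 := by
          have hr' : ((knapsack_small (total - y) (z :: t')).1 == 0) = true := by
            rw [← hl2]; exact hr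
          simpa using hr'
        rw [pvAltLoop]
        rw [if_pos (by simp only [List.length_append, List.length_cons]; push_cast; omega)]
        rw [if_neg h0]
        rw [pvGetD_append]
        rw [if_neg hle]
        have hIH := ih (pre ++ [y]) (by rw [hl2]; simpa using hp) (by rw [hl2]; simp)
        rw [hl2] at hIH
        rw [show pre ++ y :: z :: t' = (pre ++ [y]) ++ z :: t' from by simp]
        rw [show ((pre.length : Int) + 1) = ((pre ++ [y]).length : Int) from by
          simp only [List.length_append, List.length_cons, List.length_nil]; push_cast; omega]
        rw [hIH]
        simp [hfst]
  · -- recursive call, result 1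
    rename_i total xs Ls h0 hA hB num hsome Lti Lti2 hle r hr ih
    intro pre hp hne
    have hx : xs.Pairwise (fun a b : Int => a ≤ b) := (List.pairwise_append.mp hp).2.1
    have hsort : PySem.List.sorted xs (fun x => x) false = xs :=
      PySem.List.sorted_eq_self_of_pairwise xs (fun x => x) hx
    have hEq : Ls = xs := by
      have h' : Ls = PySem.List.sorted xs (fun x => x) false := rfl
      rw [h']; exact hsort
    rw [hEq] at hsome hA hB
    cases xs with
    | nil => exact absurd rfl hne
    | cons y t =>
      rw [PySem.List.pyGet?_zero_cons] at hsome
      obtain rfl : y = num := by simpa using hsome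
      cases t with
      | nil =>
        simp [PySem.List.pyGetD_zero_cons] at hA hB
        exact absurd hA hB
      | cons z t' =>
        have hl2 : Lti2 = z :: t' := by
          have h' := pvLti_eq (PySem.List.sorted (y :: z :: t') (fun x => x) false)
          exact h'.trans (by rw [hsort]; rfl)
        have hrdef : r = knapsack_small (total - y) (z :: t') := by
          conv_rhs => rw [← hl2]
        have hfst : (knapsack_small (total - y) (z :: t')).1 = 1 := by
          rcases pv_shape (total - y) (z :: t') with h1 | h1
          · exact h1
          · exfalso; rw [hrdef, h1] at hr; simp at hr
        rw [pvAltLoop]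
        rw [if_pos (by simp only [List.length_append, List.length_cons]; push_cast; omega)]
        rw [if_neg h0]
        rw [pvGetD_append]
        rw [if_neg hle]
        have hIH := ih (pre ++ [y]) (by rw [hl2]; simpa using hp) (by rw [hl2]; simp)
        rw [hl2] at hIH
        rw [show pre ++ y :: z :: t' = (pre ++ [y]) ++ z :: t' from by simp]
        rw [show ((pre.length : Int) + 1) = ((pre ++ [y]).length : Int) from by
          simp only [List.length_append, List.length_cons, List.length_nil]; push_cast; omega]
        rw [hIH]
        rw [hrdef]
        simp [hfst, PySem.List.insert_zero]

-- ===== VERDICT (by name: the statement is the Claim_ definition above) =====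
theorem knapsack_small_spec : Claim_equal_knapsack_small := by
  intro total L hdom hpre
  unfold Spec_knapsack_small
  by_cases hL : L = []
  · subst hL
    have h0 : total = 0 := hpre.resolve_right (fun h => h rfl)
    subst h0
    rw [knapsack_small.eq_def]
    have hs : PySem.List.sorted ([] : List Int) (fun x => x) false = [] :=
      (PySem.List.sorted_perm ([] : List Int) (fun x => x) false).eq_nil
    show (1, ([] : List Int)) = knapsack_small_alt 0 []
    unfold knapsack_small_alt
    rw [hs, pvAltLoop]
    rw [if_neg (by norm_num)]
    rw [if_pos (by norm_num)]
    simp [PySem.List.slice_to]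
  · rw [pv_resort total L]
    have hne : PySem.List.sorted L (fun x => x) false ≠ [] := by
      intro hnil
      have hperm := PySem.List.sorted_perm L (fun x => x) false
      rw [hnil] at hperm
      exact hL hperm.symm.eq_nil
    have hpair : (PySem.List.sorted L (fun x => x) false).Pairwise (fun a b : Int => a ≤ b) :=
      PySem.List.sorted_pairwise ..
    have hmain := pv_main total (PySem.List.sorted L (fun x => x) false) [] (by simpa using hpair) hne
    simp only [List.nil_append, List.length_nil, Nat.cast_zero] at hmain
    show knapsack_small total (PySem.List.sorted L (fun x => x) false) =
      pvAltLoop (PySem.List.sorted L (fun x => x) false)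
        ((PySem.List.sorted L (fun x => x) false).length : Int) total 0
    rw [hmain]
    rcases pv_shape total (PySem.List.sorted L (fun x => x) false) with h1 | h1
    · rw [if_pos (by simp [h1])]
      exact Prod.ext h1 rfl
    · rw [h1]; simp
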